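-- pv_equiv track=rewrite | github.com/bruno-castilho/INE5421-05208 | structures/GLC.py | subir_producoes
-- ===== SOURCE A (Python) =====
-- def subir_producoes(producao_candidata, producoes, indice_primeiro_simbolo):
--     novas_producoes = []  # Lista vazia para armazenar as novas produções
--     relacao_entre_producoes = []  # Lista vazia para armazenar pares de produções
--
--     for producao in producoes:
--         nova_producao = producao + producao_candidata[indice_primeiro_simbolo::]
--         # Cria uma nova produção adicionando a parte restante da produção candidata após o primeiro símbolo
--         par = (nova_producao, producao_candidata)  # Cria um par (nova_producao, producao_candidata)
--
--         if nova_producao not in novas_producoes:  # Verifica se a nova produção já está presente na lista de novas produções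
--             novas_producoes.append(nova_producao)  # Adiciona a nova produção à lista de novas produções
--
--         if par not in relacao_entre_producoes:  # Verifica se o par (nova_producao, producao_candidata) já está presente na lista de relações de produções
--             relacao_entre_producoes.append(par)  # Adiciona o par à lista de relações de produções
--
--     return (novas_producoes, relacao_entre_producoes)
-- ===== SOURCE B (Python) =====
-- def subir_producoes(producao_candidata, producoes, indice_primeiro_simbolo):
--     # Filter-ahead dedup: take the head, delete its future duplicates, repeat.
--     restantes = [p + producao_candidata[indice_primeiro_simbolo:] for p in producoes]
--     novas_producoes = []
--     while restantes:
--         primeira = restantes[0]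
--         novas_producoes.append(primeira)
--         restantes = [x for x in restantes[1:] if x != primeira]
--     relacao_entre_producoes = [(n, producao_candidata) for n in novas_producoes]
--     return (novas_producoes, relacao_entre_producoes)
-- ===== Notes on version B (the rewrite author's own statement) =====
-- stated objective: alternative
-- what changed: A dedups by testing each new item against the growing output lists inside one interleaved loop; B first maps all productions to their suffixed form, then dedups by repeatedly taking the head and filtering its duplicates out of the remaining input (no membership test against the output), and derives the pair list afterwards by a map since the pair's second component is loop-invariant.
import Mathlib
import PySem

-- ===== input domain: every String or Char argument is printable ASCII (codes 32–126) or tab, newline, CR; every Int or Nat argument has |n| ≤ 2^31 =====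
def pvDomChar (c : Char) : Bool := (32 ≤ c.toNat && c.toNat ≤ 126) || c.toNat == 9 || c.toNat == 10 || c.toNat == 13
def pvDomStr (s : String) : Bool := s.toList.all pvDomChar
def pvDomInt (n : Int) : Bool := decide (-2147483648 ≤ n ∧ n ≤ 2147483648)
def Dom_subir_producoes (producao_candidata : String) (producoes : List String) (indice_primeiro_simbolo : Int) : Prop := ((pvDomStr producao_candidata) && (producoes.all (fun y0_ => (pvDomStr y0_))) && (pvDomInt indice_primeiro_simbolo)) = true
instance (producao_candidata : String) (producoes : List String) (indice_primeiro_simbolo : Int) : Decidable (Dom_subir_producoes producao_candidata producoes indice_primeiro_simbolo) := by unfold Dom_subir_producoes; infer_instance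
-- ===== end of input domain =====

-- B replaces A's interleaved seen-membership dedup by a filter-ahead dedup
-- (take head, delete its future duplicates) plus a derived pair list (alternative decomposition).

-- ===== PORT A =====
-- A: one loop; each item may be appended to novas_producoes and to relacao_entre_producoes
-- after a linear membership test on each list.
def subir_producoes (producao_candidata : String) (producoes : List String) (indice_primeiro_simbolo : Int) : List String × (List (String × String)) :=
  producoes.foldl
    (fun acc producao =>
      let nova_producao : String :=
        String.ofList (producao.toList ++ PySem.List.slice producao_candidata.toList (some indice_primeiro_simbolo) none)
      let par : String × String := (nova_producao, producao_candidata)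
      (if nova_producao ∈ acc.1 then acc.1 else acc.1 ++ [nova_producao],
       if par ∈ acc.2 then acc.2 else acc.2 ++ [par]))
    ([], [])

-- ===== PORT B =====
-- B: the while loop over `restantes` — take the head, filter its duplicates out of the rest.
def pvDedupAhead : List String → List String
  | [] => []
  | h :: t => h :: pvDedupAhead (t.filter (fun x => x ≠ h))
termination_by xs => xs.length
decreasing_by
  simpa using Nat.lt_succ_of_le (List.length_filter_le _ t.attach)

def subir_producoes_alt (producao_candidata : String) (producoes : List String) (indice_primeiro_simbolo : Int) : List String × (List (String × String)) :=
  let restantes := producoes.map (fun p =>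
    String.ofList (p.toList ++ PySem.List.slice producao_candidata.toList (some indice_primeiro_simbolo) none))
  let novas_producoes := pvDedupAhead restantes
  (novas_producoes, novas_producoes.map (fun n => (n, producao_candidata)))

-- ===== PRECONDITION & SPEC =====
def Spec_subir_producoes (producao_candidata : String) (producoes : List String) (indice_primeiro_simbolo : Int) (out : List String × (List (String × String))) : Prop := out = subir_producoes_alt producao_candidata producoes indice_primeiro_simbolo
instance (producao_candidata : String) (producoes : List String) (indice_primeiro_simbolo : Int) (out : List String × (List (String × String))) : Decidable (Spec_subir_producoes producao_candidata producoes indice_primeiro_simbolo out) := by unfold Spec_subir_producoes; infer_instance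

-- ===== CLAIM =====
def Claim_equal_subir_producoes : Prop := ∀ (producao_candidata : String) (producoes : List String) (indice_primeiro_simbolo : Int), Dom_subir_producoes producao_candidata producoes indice_primeiro_simbolo → Spec_subir_producoes producao_candidata producoes indice_primeiro_simbolo (subir_producoes producao_candidata producoes indice_primeiro_simbolo)

-- ===== LEMMAS AND PROOFS =====

-- A's loop: the pair list stays the map of the dedup list, and the dedup list
-- evolves exactly as PySem.Set.add.
theorem subir_producoes_loop (cand : String) (l : List String) (f : String → String) (n : List String) :
    l.foldl
      (fun acc producao =>
        let nova := f producao
        let par : String × String := (nova, cand)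
        (if nova ∈ acc.1 then acc.1 else acc.1 ++ [nova],
         if par ∈ acc.2 then acc.2 else acc.2 ++ [par]))
      (n, n.map (fun s => (s, cand)))
    = ((l.map f).foldl PySem.Set.add n,
       ((l.map f).foldl PySem.Set.add n).map (fun s => (s, cand))) := by
  induction l generalizing n with
  | nil => simp
  | cons x l ih =>
    simp only [List.foldl_cons, List.map_cons]
    have hstate :
        ((if f x ∈ n then n else n ++ [f x],
          if f x ∈ n then List.map (fun s => (s, cand)) n
          else List.map (fun s => (s, cand)) n ++ [(f x, cand)])
          : List String × List (String × String))
        = (PySem.Set.add n (f x), (PySem.Set.add n (f x)).map (fun s => (s, cand))) := by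
      by_cases h : f x ∈ n <;> simp [PySem.Set.add, PySem.Set.contains, h]
    simpa [hstate] using ih (PySem.Set.add n (f x))

-- Skipping already-seen elements of the input does not change the seen-set fold.
theorem foldl_add_filter_ne (h : String) (acc : List String) (hmem : h ∈ acc) (xs : List String) :
    xs.foldl PySem.Set.add acc = (xs.filter (fun x => x ≠ h)).foldl PySem.Set.add acc := by
  induction xs generalizing acc with
  | nil => rfl
  | cons x xs ih =>
    by_cases hx : x = h
    · subst hx
      have : PySem.Set.add acc x = acc := by
        simp [PySem.Set.add, PySem.Set.contains, hmem]
      simp [this, ih acc hmem]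
    · have hmem' : h ∈ PySem.Set.add acc x := by
        simp [PySem.Set.add, PySem.Set.contains]
        split <;> simp [hmem]
      simp [hx, ih _ hmem']

-- Pulling one fresh head out of the accumulator.
theorem foldl_add_cons (h : String) (xs : List String) (acc : List String)
    (hall : ∀ y ∈ xs, y ≠ h) :
    xs.foldl PySem.Set.add (h :: acc) = h :: xs.foldl PySem.Set.add acc := by
  induction xs generalizing acc with
  | nil => rfl
  | cons x xs ih =>
    have hx : x ≠ h := hall x (by simp)
    have hadd : PySem.Set.add (h :: acc) x = h :: PySem.Set.add acc x := by
      simp [PySem.Set.add, PySem.Set.contains, hx]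
      split <;> simp
    simp only [List.foldl_cons, hadd]
    exact ih _ (fun y hy => hall y (List.mem_cons_of_mem _ hy))

theorem foldl_add_singleton (h : String) (xs : List String) (hne : h ∉ xs) :
    xs.foldl PySem.Set.add [h] = h :: xs.foldl PySem.Set.add [] := by
  exact foldl_add_cons h xs [] (fun y hy => by rintro rfl; exact hne hy)

-- B's filter-ahead dedup computes the seen-set fold.
theorem pvDedupAhead_eq_foldl (xs : List String) :
    pvDedupAhead xs = xs.foldl PySem.Set.add [] := by
  induction hn : xs.length using Nat.strong_induction_on generalizing xs with
  | _ n ih =>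
    match xs, hn with
    | [], _ => simp [pvDedupAhead]
    | h :: t, hn =>
      have hlen : (t.filter (fun x => x ≠ h)).length < n := by
        subst hn
        exact Nat.lt_succ_of_le (List.length_filter_le _ _)
      have hrec := ih _ hlen (t.filter (fun x => x ≠ h)) rfl
      have hne : h ∉ t.filter (fun x => x ≠ h) := by
        simp [List.mem_filter]
      calc pvDedupAhead (h :: t)
          = h :: pvDedupAhead (t.filter (fun x => x ≠ h)) := by rw [pvDedupAhead]
        _ = h :: (t.filter (fun x => x ≠ h)).foldl PySem.Set.add [] := by rw [hrec]
        _ = (t.filter (fun x => x ≠ h)).foldl PySem.Set.add [h] := (foldl_add_singleton h _ hne).symm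
        _ = t.foldl PySem.Set.add [h] := (foldl_add_filter_ne h [h] (by simp) t).symm
        _ = (h :: t).foldl PySem.Set.add [] := by
              simp [List.foldl_cons, PySem.Set.add, PySem.Set.contains]

-- ===== VERDICT =====
theorem subir_producoes_spec : Claim_equal_subir_producoes := by
  intro cand prods i _
  unfold Spec_subir_producoes subir_producoes subir_producoes_alt
  have h := subir_producoes_loop cand prods
      (fun p => String.ofList (p.toList ++ PySem.List.slice cand.toList (some i) none)) []
  simpa [pvDedupAhead_eq_foldl] using h
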